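-- pv_equiv track=rewrite | github.com/George-Ober/TP-ITC | TP7/TP7.py | remplir_sac_optimal
-- ===== SOURCE A (Python) =====
-- import itertools
--
-- def poids(sac):
--     return info(sac, 1)
--
-- def valeur(sac):
--     return info(sac, 2)
--
-- def info(sac, k):
--     return sum([sac[i][k] for i in range(len(sac))])
--
-- def sacs_possibles(butin, poids_total):
--     parties_trop_belles_pas_comme_mr_menard = list(itertools.chain(*(itertools.combinations(butin, k) for k in range(0, len(butin) + 1))))
--     liste_des_meilleurs_pas_comme_mr_menard = []
--     for partie in parties_trop_belles_pas_comme_mr_menard: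
--         if poids(partie) <= poids_total:
--             liste_des_meilleurs_pas_comme_mr_menard.append(partie)
--     liste_des_meilleurs_pas_comme_mr_menard[1:]
--     return liste_des_meilleurs_pas_comme_mr_menard
--
-- def remplir_sac_optimal(butin, poids_total):
--     possibles = sacs_possibles(butin, poids_total)
--     meilleurs_trouves = []
--     meilleure_valeur = 0
--     for el in possibles:
--         if valeur(el) > meilleure_valeur:
--             meilleure_valeur = valeur(el)
--             meilleurs_trouves = []
--             meilleurs_trouves.append(el)
--         elif valeur(el) == meilleure_valeur:
--             meilleurs_trouves.append(el)
--     return meilleurs_trouves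
-- ===== SOURCE B (Python) =====
-- def _expand(s, r):
--     # successors of a partial subset: pick each remaining item in turn,
--     # keeping only the items after it as the new remainder
--     return [(s + (r[i],), r[i + 1:]) for i in range(len(r))]
--
--
-- def remplir_sac_optimal(butin, poids_total):
--     # breadth-first enumeration by subset size: level k holds all size-k
--     # subsets (in lexicographic index order) paired with their remainders
--     all_subsets = []
--     level = [((), tuple(butin))]
--     while level:
--         all_subsets.extend(s for s, _ in level)
--         next_level = []
--         for p in level:
--             next_level.extend(_expand(p[0], p[1]))
--         level = next_level
--     feasible = [s for s in all_subsets if sum(x[1] for x in s) <= poids_total]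
--     best = max([0] + [sum(x[2] for x in s) for s in feasible])
--     return [s for s in feasible if sum(x[2] for x in s) == best]
-- ===== Notes on version B (the rewrite author's own statement) =====
-- stated objective: alternative
-- what changed: A chains itertools.combinations per size and keeps a running best-value accumulator; B enumerates subsets breadth-first by levels of (subset, remainder) pairs and then does a two-pass max-then-select over the feasible list.
import Mathlib
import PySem

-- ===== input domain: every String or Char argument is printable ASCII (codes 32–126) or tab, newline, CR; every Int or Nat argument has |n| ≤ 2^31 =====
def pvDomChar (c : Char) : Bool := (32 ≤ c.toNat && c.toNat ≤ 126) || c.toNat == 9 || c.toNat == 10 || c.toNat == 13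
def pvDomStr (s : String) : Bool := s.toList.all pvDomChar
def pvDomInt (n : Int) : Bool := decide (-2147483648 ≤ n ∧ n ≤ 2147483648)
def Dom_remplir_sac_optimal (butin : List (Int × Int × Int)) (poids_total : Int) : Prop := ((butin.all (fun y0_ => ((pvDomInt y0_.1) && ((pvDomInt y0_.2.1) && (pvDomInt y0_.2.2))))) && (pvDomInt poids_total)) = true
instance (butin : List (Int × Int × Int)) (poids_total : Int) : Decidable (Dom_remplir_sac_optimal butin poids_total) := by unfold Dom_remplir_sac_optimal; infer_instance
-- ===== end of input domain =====

-- B replaces A's chain-of-combinations enumeration by a breadth-first level expansion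
-- (size k subsets paired with their remainders) and A's running-best accumulator by a
-- two-pass max-then-select; objective: alternative decomposition (same output, same order).

-- ===== PORT A =====
-- sum([sac[i][1] ...]) : sums the weight field of every element of sac
def pvPoidsA (sac : List (Int × Int × Int)) : Int := (sac.map (fun t => t.2.1)).sum
-- sum([sac[i][2] ...]) : sums the value field of every element of sac
def pvValeurA (sac : List (Int × Int × Int)) : Int := (sac.map (fun t => t.2.2)).sum

-- exact port of itertools.combinations(xs, k): size-k subsequences in lexicographic index order
def pyCombos : List (Int × Int × Int) → Nat → List (List (Int × Int × Int))
  | _, 0 => [[]]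
  | [], _ + 1 => []
  | x :: xs, k + 1 => (pyCombos xs k).map (fun t => x :: t) ++ pyCombos xs (k + 1)

-- sacs_possibles: chain of combinations for k = 0..len(butin), then the append-if loop
def pvSacsPossibles (butin : List (Int × Int × Int)) (poids_total : Int) : List (List (Int × Int × Int)) :=
  ((List.range (butin.length + 1)).flatMap (fun k => pyCombos butin k)).foldl
    (fun acc partie => if pvPoidsA partie ≤ poids_total then acc ++ [partie] else acc) []

def remplir_sac_optimal (butin : List (Int × Int × Int)) (poids_total : Int) : List (List (Int × Int × Int)) :=
  (((pvSacsPossibles butin poids_total).foldl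
    (fun st el =>
      if pvValeurA el > st.1 then (pvValeurA el, [el])
      else if pvValeurA el = st.1 then (st.1, st.2 ++ [el])
      else st)
    ((0 : Int), ([] : List (List (Int × Int × Int)))))).2

-- ===== PORT B =====
def pvWsum (s : List (Int × Int × Int)) : Int := (s.map (fun t => t.2.1)).sum
def pvVsum (s : List (Int × Int × Int)) : Int := (s.map (fun t => t.2.2)).sum

-- _expand(s, r): one pair per index i of r (structural recursion on r, same order)
def pvExpand (s : List (Int × Int × Int)) : List (Int × Int × Int) → List (List (Int × Int × Int) × List (Int × Int × Int))
  | [] => []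
  | x :: rs => (s ++ [x], rs) :: pvExpand s rs

-- one body of the while loop: next_level built by extending every pair of level
def pvStep (level : List (List (Int × Int × Int) × List (Int × Int × Int))) : List (List (Int × Int × Int) × List (Int × Int × Int)) :=
  level.flatMap (fun p => pvExpand p.1 p.2)

-- the while loop; fuel is only a totality guard (the loop empties after ≤ len(butin)+1 rounds)
def pvLoopB : Nat → List (List (Int × Int × Int) × List (Int × Int × Int)) → List (List (Int × Int × Int))
  | 0, _ => []
  | f + 1, level => if level = [] then [] else level.map Prod.fst ++ pvLoopB f (pvStep level)

def remplir_sac_optimal_alt (butin : List (Int × Int × Int)) (poids_total : Int) : List (List (Int × Int × Int)) :=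
  let all_subsets := pvLoopB (butin.length + 2) [([], butin)]
  let feasible := all_subsets.filter (fun s => pvWsum s ≤ poids_total)
  let best := (feasible.map pvVsum).foldl max 0    -- max([0] + values)
  feasible.filter (fun s => pvVsum s = best)

-- ===== PRECONDITION & SPEC =====
def Spec_remplir_sac_optimal (butin : List (Int × Int × Int)) (poids_total : Int) (out : List (List (Int × Int × Int))) : Prop := out = remplir_sac_optimal_alt butin poids_total
instance (butin : List (Int × Int × Int)) (poids_total : Int) (out : List (List (Int × Int × Int))) : Decidable (Spec_remplir_sac_optimal butin poids_total out) := by unfold Spec_remplir_sac_optimal; infer_instance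

-- ===== CLAIM (what is proved, stated in full; the proofs are below) =====
def Claim_equal_remplir_sac_optimal : Prop := ∀ (butin : List (Int × Int × Int)) (poids_total : Int), Dom_remplir_sac_optimal butin poids_total → Spec_remplir_sac_optimal butin poids_total (remplir_sac_optimal butin poids_total)

-- ===== LEMMAS AND PROOFS =====

-- the append-if loop of sacs_possibles is a filter
lemma sacs_eq_filter (butin : List (Int × Int × Int)) (W : Int) :
    pvSacsPossibles butin W =
      ((List.range (butin.length + 1)).flatMap (fun k => pyCombos butin k)).filter
        (fun s => pvPoidsA s ≤ W) := by
  unfold pvSacsPossibles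
  generalize (List.range (butin.length + 1)).flatMap (fun k => pyCombos butin k) = l
  suffices h : ∀ acc, l.foldl (fun acc partie => if pvPoidsA partie ≤ W then acc ++ [partie] else acc) acc
      = acc ++ l.filter (fun s => pvPoidsA s ≤ W) by simpa using h []
  induction l with
  | nil => simp
  | cons x xs ih =>
    intro acc
    by_cases hx : pvPoidsA x ≤ W <;> simp [List.foldl_cons, hx, ih]

lemma combos_nil_of_gt : ∀ (xs : List (Int × Int × Int)) (k : Nat), xs.length < k → pyCombos xs k = [] := by
  intro xs
  induction xs with
  | nil => intro k hk; cases k with | zero => omega | succ k => rfl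
  | cons x xs ih =>
    intro k hk
    cases k with
    | zero => omega
    | succ k =>
      simp only [pyCombos]
      rw [ih k (by simpa using hk), ih (k + 1) (by simp at hk ⊢; omega)]
      rfl

-- per-pair expansion: expanding then taking size-k extensions = size-(k+1) extensions
lemma expand_flatMap (k : Nat) : ∀ (s r : List (Int × Int × Int)),
    (pvExpand s r).flatMap (fun p => (pyCombos p.2 k).map (fun t => p.1 ++ t)) =
      (pyCombos r (k + 1)).map (fun t => s ++ t) := by
  intro s r
  induction r generalizing s with
  | nil => rfl
  | cons x rs ih =>
    simp only [pvExpand, pyCombos, List.flatMap_cons, List.map_append, List.map_map, ih]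
    congr 1
    simp [Function.comp]

lemma step_combos : ∀ (k : Nat) (L : List (List (Int × Int × Int) × List (Int × Int × Int))),
    (pvStep^[k] L).map Prod.fst = L.flatMap (fun p => (pyCombos p.2 k).map (fun t => p.1 ++ t)) := by
  intro k
  induction k with
  | zero =>
    intro L
    simp [pyCombos, List.map_eq_flatMap]
  | succ k ih =>
    intro L
    rw [Function.iterate_succ_apply, ih, pvStep, List.flatMap_assoc]
    apply List.flatMap_congr  -- pointwise
    intro p _
    exact expand_flatMap k p.1 p.2

lemma step_nil : pvStep [] = [] := rfl

lemma loopB_eq : ∀ (f : Nat) (L : List (List (Int × Int × Int) × List (Int × Int × Int))),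
    pvStep^[f] L = [] →
    pvLoopB f L = (List.range f).flatMap (fun k => (pvStep^[k] L).map Prod.fst) := by
  intro f
  induction f with
  | zero => intro L _; simp [pvLoopB]
  | succ f ih =>
    intro L hL
    by_cases h : L = []
    · subst h
      have hall : ∀ k, pvStep^[k] ([] : List (List (Int × Int × Int) × List (Int × Int × Int))) = [] := by
        intro k; induction k with
        | zero => rfl
        | succ k ihk => rw [Function.iterate_succ_apply, step_nil, ihk]
      simp [pvLoopB, hall]
    · rw [pvLoopB, if_neg h]
      rw [Function.iterate_succ_apply] at hL
      rw [ih (pvStep L) hL]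
      rw [List.range_succ_eq_map]
      simp only [List.flatMap_cons, Function.iterate_zero_apply, List.flatMap_map]
      simp [Function.iterate_succ_apply]

-- B's enumeration equals A's chain of combinations
lemma allB_eq (xs : List (Int × Int × Int)) :
    pvLoopB (xs.length + 2) [([], xs)] =
      (List.range (xs.length + 1)).flatMap (fun k => pyCombos xs k) := by
  have hk : ∀ k, (pvStep^[k] [(([] : List (Int × Int × Int)), xs)]).map Prod.fst = pyCombos xs k := by
    intro k; rw [step_combos]; simp
  have hempty : pvStep^[xs.length + 2] [(([] : List (Int × Int × Int)), xs)] = [] := by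
    have h1 : (pvStep^[xs.length + 1] [(([] : List (Int × Int × Int)), xs)]).map Prod.fst = [] := by
      rw [hk]; exact combos_nil_of_gt xs (xs.length + 1) (by omega)
    have h2 : pvStep^[xs.length + 1] [(([] : List (Int × Int × Int)), xs)] = [] :=
      List.map_eq_nil_iff.mp h1
    rw [Function.iterate_succ_apply', h2, step_nil]
  rw [loopB_eq _ _ hempty]
  have : xs.length + 2 = (xs.length + 1) + 1 := rfl
  rw [this, List.range_succ, List.flatMap_append]
  have hlast : (pvStep^[xs.length + 1] [(([] : List (Int × Int × Int)), xs)]).map Prod.fst = [] := by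
    rw [hk]; exact combos_nil_of_gt xs (xs.length + 1) (by omega)
  simp only [List.flatMap_cons, List.flatMap_nil, hlast, List.append_nil]
  apply List.flatMap_congr
  intro k _
  exact hk k

lemma le_foldl_max : ∀ (l : List (List (Int × Int × Int))) (b : Int),
    b ≤ l.foldl (fun m s => max m (pvVsum s)) b := by
  intro l
  induction l with
  | nil => intro b; simp
  | cons x xs ih =>
    intro b
    simp only [List.foldl_cons]
    exact le_trans (le_max_left b (pvVsum x)) (ih (max b (pvVsum x)))

-- A's running-best fold, fully characterised
lemma fold_best : ∀ (l : List (List (Int × Int × Int))) (b : Int) (acc : List (List (Int × Int × Int))),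
    l.foldl (fun st el =>
      if pvVsum el > st.1 then (pvVsum el, [el])
      else if pvVsum el = st.1 then (st.1, st.2 ++ [el])
      else st) (b, acc)
    = (l.foldl (fun m s => max m (pvVsum s)) b,
       if l.foldl (fun m s => max m (pvVsum s)) b = b
       then acc ++ l.filter (fun s => pvVsum s = b)
       else l.filter (fun s => pvVsum s = l.foldl (fun m s => max m (pvVsum s)) b)) := by
  intro l
  induction l with
  | nil => intro b acc; simp
  | cons x xs ih =>
    intro b acc
    simp only [List.foldl_cons]
    rcases lt_trichotomy b (pvVsum x) with hlt | heq | hgt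
    · have hmax : max b (pvVsum x) = pvVsum x := max_eq_right (le_of_lt hlt)
      rw [if_pos (show pvVsum x > b from hlt)]
      simp only [hmax]
      rw [ih]
      have hM := le_foldl_max xs (pvVsum x)
      by_cases hMx : xs.foldl (fun m s => max m (pvVsum s)) (pvVsum x) = pvVsum x
      · simp only [hMx]
        rw [if_neg (show ¬ pvVsum x = b by omega)]
        simp
      · rw [if_neg hMx, if_neg (by omega), List.filter_cons,
          if_neg (by simp only [decide_eq_true_eq]; exact fun h => hMx h.symm)]
    · have hmax : max b (pvVsum x) = b := max_eq_left (le_of_eq heq.symm)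
      rw [if_neg (by omega), if_pos heq.symm]
      simp only [hmax]
      rw [ih]
      by_cases hMb : xs.foldl (fun m s => max m (pvVsum s)) b = b
      · simp only [hMb]
        simp [← heq]
      · rw [if_neg hMb, if_neg hMb, List.filter_cons,
          if_neg (by simp only [decide_eq_true_eq]; intro h; rw [← heq] at h; exact hMb h.symm)]
    · have hmax : max b (pvVsum x) = b := max_eq_left (le_of_lt hgt)
      rw [if_neg (by omega), if_neg (by omega)]
      simp only [hmax]
      rw [ih]
      have hM := le_foldl_max xs b
      by_cases hMb : xs.foldl (fun m s => max m (pvVsum s)) b = b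
      · simp only [hMb]
        have hne : ¬ pvVsum x = b := by omega
        simp [hne]
      · rw [if_neg hMb, if_neg hMb, List.filter_cons,
          if_neg (by simp only [decide_eq_true_eq]; omega)]

-- ===== VERDICT (by name: the statement is the Claim_ definition above) =====
theorem remplir_sac_optimal_spec : Claim_equal_remplir_sac_optimal := by
  intro butin W _
  show remplir_sac_optimal butin W = remplir_sac_optimal_alt butin W
  simp only [remplir_sac_optimal, remplir_sac_optimal_alt]
  rw [sacs_eq_filter, ← allB_eq]
  simp only [show pvPoidsA = pvWsum from rfl, show pvValeurA = pvVsum from rfl]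
  rw [fold_best]
  simp only [List.foldl_map]
  split_ifs with h0
  · simp only [h0, List.nil_append]
  · rfl
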